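-- pv_equiv track=rewrite | github.com/thugdang/study-python | Bai100 Tr17.py | cach1
-- ===== SOURCE A (Python) =====
-- def cach1(n):
--     tong = 0
--     tich = 1
--     max = 0
--     chan = 0
--     le = 0
--     while n > 0:
--         a = n % 10
--         n //= 10
--         if a > max:
--             max = a
--         if a % 2 == 0:
--             chan += 1
--         else:
--             le += 1
--         tong += a
--         tich *= a
--     return tong, tich, max, chan, le
-- ===== SOURCE B (Python) =====
-- def cach1(n):
--     digits = [int(c) for c in str(n)] if n > 0 else []
--     tong = sum(digits)
--     tich = 1
--     for d in digits:
--         tich *= d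
--     max_ = max(digits, default=0)
--     chan = sum(1 for d in digits if d % 2 == 0)
--     le = len(digits) - chan
--     return tong, tich, max_, chan, le
-- ===== Notes on version B (the rewrite author's own statement) =====
-- stated objective: idiomatic
-- what changed: Builds the digit list once from str(n) and derives the five results with separate builtin reductions (sum, max with default, counts) instead of a single mod/div accumulator loop.
import Mathlib
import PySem

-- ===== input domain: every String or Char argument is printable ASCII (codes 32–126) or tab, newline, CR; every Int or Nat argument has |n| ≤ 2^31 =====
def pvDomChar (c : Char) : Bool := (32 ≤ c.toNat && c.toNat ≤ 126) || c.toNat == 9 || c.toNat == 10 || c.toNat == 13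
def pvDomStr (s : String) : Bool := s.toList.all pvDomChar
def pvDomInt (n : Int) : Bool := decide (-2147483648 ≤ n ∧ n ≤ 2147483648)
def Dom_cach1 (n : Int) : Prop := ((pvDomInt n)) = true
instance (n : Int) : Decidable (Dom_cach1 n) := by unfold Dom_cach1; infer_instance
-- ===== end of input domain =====

-- B derives the digit list once from str(n) and consumes it with separate builtin reductions
-- (sum, running product, max with default 0, even count, length) instead of A's single mod/div accumulator loop.

-- ===== PORT A =====
def cach1Go (n tong tich mx chan le : Int) : Int × Int × Int × Int × Int :=
  if 0 < n then
    let a := PySem.Int.mod n 10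
    let n' := PySem.Int.floordiv n 10
    let mx' := if a > mx then a else mx
    let chan' := if PySem.Int.mod a 2 = 0 then chan + 1 else chan
    let le' := if PySem.Int.mod a 2 = 0 then le else le + 1
    cach1Go n' (tong + a) (tich * a) mx' chan' le'
  else (tong, tich, mx, chan, le)
termination_by n.toNat
decreasing_by
  simp only [PySem.Int.floordiv_eq_ediv_of_pos (by norm_num : (0:Int) < 10)]
  omega

def cach1 (n : Int) : Int × Int × Int × Int × Int :=
  cach1Go n 0 1 0 0 0

-- ===== PORT B =====
def cach1_alt (n : Int) : Int × Int × Int × Int × Int :=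
  -- int(c) ported as c.toNat - 48: exact on the decimal digit characters str(n) produces for n > 0
  let digits : List Int := if 0 < n then (PySem.Int.toChars n).map (fun c => (c.toNat : Int) - 48) else []
  let tong := digits.sum
  let tich := digits.foldl (· * ·) 1
  let mx := PySem.List.maxD digits (fun x => x) 0
  let chan := (digits.map (fun d => if PySem.Int.mod d 2 = 0 then (1 : Int) else 0)).sum
  let le := (digits.length : Int) - chan
  (tong, tich, mx, chan, le)

-- ===== PRECONDITION & SPEC =====
def Spec_cach1 (n : Int) (out : Int × Int × Int × Int × Int) : Prop := out = cach1_alt n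
instance (n : Int) (out : Int × Int × Int × Int × Int) : Decidable (Spec_cach1 n out) := by unfold Spec_cach1; infer_instance

-- ===== CLAIM (what is proved, stated in full; the proofs are below) =====
def Claim_equal_cach1 : Prop := ∀ (n : Int), Dom_cach1 n → Spec_cach1 n (cach1 n)

-- ===== LEMMAS AND PROOFS =====

-- A's digit chain, least-significant first
def dI (n : Int) : List Int :=
  if 0 < n then PySem.Int.mod n 10 :: dI (PySem.Int.floordiv n 10) else []
termination_by n.toNat
decreasing_by
  simp only [PySem.Int.floordiv_eq_ediv_of_pos (by norm_num : (0:Int) < 10)]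
  omega

-- the Nat digit chain underlying Nat.toDigits
def dN (m : Nat) : List Nat :=
  if m = 0 then [] else m % 10 :: dN (m / 10)
decreasing_by exact Nat.div_lt_self (by omega) (by norm_num)

-- A's loop body as a fold step
def stepA (s : Int × Int × Int × Int × Int) (a : Int) : Int × Int × Int × Int × Int :=
  (s.1 + a, s.2.1 * a, if a > s.2.2.1 then a else s.2.2.1,
   if PySem.Int.mod a 2 = 0 then s.2.2.2.1 + 1 else s.2.2.2.1,
   if PySem.Int.mod a 2 = 0 then s.2.2.2.2 else s.2.2.2.2 + 1)

theorem go_eq_fold_aux (k : Nat) : ∀ n t p m c l : Int, n.toNat ≤ k →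
    cach1Go n t p m c l = List.foldl stepA (t, p, m, c, l) (dI n) := by
  induction k with
  | zero =>
    intro n t p m c l hk
    have h : ¬ 0 < n := by omega
    rw [cach1Go, if_neg h, dI, if_neg h]
    rfl
  | succ k ih =>
    intro n t p m c l hk
    by_cases h : 0 < n
    · rw [cach1Go, if_pos h, dI, if_pos h]
      simp only [List.foldl_cons, stepA]
      refine ih _ _ _ _ _ _ ?_
      rw [PySem.Int.floordiv_eq_ediv_of_pos (by norm_num : (0:Int) < 10)]
      omega
    · rw [cach1Go, if_neg h, dI, if_neg h]
      rfl

theorem go_eq_fold (n t p m c l : Int) :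
    cach1Go n t p m c l = List.foldl stepA (t, p, m, c, l) (dI n) :=
  go_eq_fold_aux n.toNat n t p m c l le_rfl

theorem foldl_mul_init (ds : List Int) (a : Int) :
    ds.foldl (· * ·) a = a * ds.foldl (· * ·) 1 := by
  induction ds generalizing a with
  | nil => simp
  | cons d ds ih =>
    simp only [List.foldl_cons]
    rw [ih (a * d), ih (1 * d)]
    ring

theorem foldl_max_init (ds : List Int) (a b : Int) :
    ds.foldl max (max a b) = max (ds.foldl max a) b := by
  induction ds generalizing a with
  | nil => rfl
  | cons d ds ih =>
    simp only [List.foldl_cons]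
    rw [max_right_comm a b d, ih]

theorem if_gt_eq_max (m d : Int) : (if d > m then d else m) = max m d := by
  rcases lt_or_ge m d with h | h
  · simp [h, max_eq_right h.le]
  · simp [not_lt.mpr h, max_eq_left h]

theorem fold_closed (ds : List Int) (t p m c l : Int) :
    List.foldl stepA (t, p, m, c, l) ds =
      (t + ds.sum, p * ds.foldl (· * ·) 1, ds.foldl max m,
       c + (ds.map (fun d => if PySem.Int.mod d 2 = 0 then (1 : Int) else 0)).sum,
       l + ((ds.length : Int)
            - (ds.map (fun d => if PySem.Int.mod d 2 = 0 then (1 : Int) else 0)).sum)) := by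
  induction ds generalizing t p m c l with
  | nil => simp
  | cons d ds ih =>
    simp only [List.foldl_cons, List.sum_cons, List.map_cons, List.length_cons, stepA]
    rw [ih]
    refine Prod.ext ?_ (Prod.ext ?_ (Prod.ext ?_ (Prod.ext ?_ ?_))) <;> simp only
    · ring
    · rw [foldl_mul_init ds (1 * d)]; ring
    · rw [if_gt_eq_max]
    · split_ifs <;> ring
    · split_ifs <;> push_cast <;> ring

theorem dN_mem_lt (m : Nat) : ∀ d ∈ dN m, d < 10 := by
  induction m using dN.induct with
  | case1 => rw [dN]; simp
  | case2 m h ih =>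
    rw [dN, if_neg h]
    intro d hd
    rcases List.mem_cons.mp hd with rfl | hd
    · omega
    · exact ih d hd

theorem digitVal_digitChar (d : Nat) (h : d < 10) :
    ((Nat.digitChar d).toNat : Int) - 48 = (d : Int) := by
  interval_cases d <;> decide

theorem toDigitsCore_eq (fuel : Nat) : ∀ m ds, 0 < m → m < fuel →
    Nat.toDigitsCore 10 fuel m ds = ((dN m).reverse.map Nat.digitChar) ++ ds := by
  induction fuel with
  | zero => omega
  | succ fuel ih =>
    intro m ds hm hlt
    rw [Nat.toDigitsCore]
    by_cases h0 : m / 10 = 0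
    · rw [if_pos h0]
      conv_rhs => rw [dN]
      rw [if_neg (show ¬ m = 0 by omega), dN, if_pos h0]
      simp
    · rw [if_neg h0, ih (m / 10) _ (by omega) (by omega)]
      conv_rhs => rw [dN]
      rw [if_neg (show ¬ m = 0 by omega)]
      simp

theorem digits_eq_rev (n : Int) (h : 0 < n) :
    (PySem.Int.toChars n).map (fun c => (c.toNat : Int) - 48)
      = (dN n.toNat).reverse.map (fun d : Nat => (d : Int)) := by
  rw [PySem.Int.toChars, if_neg (by omega), Nat.toDigits,
      toDigitsCore_eq (n.toNat + 1) n.toNat [] (by omega) (by omega)]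
  simp only [List.append_nil, List.map_map]
  refine List.map_congr_left ?_
  intro d hd
  simp only [Function.comp_apply]
  exact digitVal_digitChar d (dN_mem_lt n.toNat d (List.mem_reverse.mp hd))

theorem dI_eq_dN (n : Int) : dI n = (dN n.toNat).map (fun d : Nat => (d : Int)) := by
  induction n using dI.induct with
  | case1 n h ih =>
    have h10 : (0:Int) < 10 := by norm_num
    have e1 : PySem.Int.mod n 10 = ((n.toNat % 10 : Nat) : Int) := by
      rw [PySem.Int.mod_eq_emod_of_pos h10]; omega
    have e2 : (PySem.Int.floordiv n 10).toNat = n.toNat / 10 := by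
      rw [PySem.Int.floordiv_eq_ediv_of_pos h10]; omega
    rw [dI, if_pos h, e1, ih, e2]
    conv_rhs => rw [dN]
    rw [if_neg (show ¬ n.toNat = 0 by omega)]
    simp only [List.map_cons]
  | case2 n h =>
    rw [dI, if_neg h]
    conv_rhs => rw [dN]
    rw [if_pos (show n.toNat = 0 by omega)]
    rfl

theorem dI_nonneg (n : Int) : ∀ d ∈ dI n, 0 ≤ d := by
  induction n using dI.induct with
  | case1 n h ih =>
    rw [dI, if_pos h]
    intro d hd
    rcases List.mem_cons.mp hd with rfl | hd
    · exact PySem.Int.mod_nonneg _ (by norm_num)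
    · exact ih d hd
  | case2 n h =>
    rw [dI, if_neg h]
    simp

theorem foldl_mul_reverse (ds : List Int) :
    ds.reverse.foldl (· * ·) 1 = ds.foldl (· * ·) 1 := by
  induction ds with
  | nil => rfl
  | cons d ds ih =>
    simp only [List.reverse_cons, List.foldl_append, List.foldl_cons, List.foldl_nil, ih]
    rw [foldl_mul_init ds (1 * d)]
    ring

theorem foldl_max_reverse (ds : List Int) (a : Int) :
    ds.reverse.foldl max a = ds.foldl max a := by
  induction ds generalizing a with
  | nil => rfl
  | cons d ds ih =>
    simp only [List.reverse_cons, List.foldl_append, List.foldl_cons, List.foldl_nil, ih]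
    rw [foldl_max_init]

theorem maxD_rev_eq (ds : List Int) (hne : ds ≠ []) (hnn : ∀ d ∈ ds, 0 ≤ d) :
    PySem.List.maxD ds.reverse (fun x => x) 0 = ds.foldl max 0 := by
  obtain ⟨r, t, hrt⟩ : ∃ r t, ds.reverse = r :: t := by
    rcases hr : ds.reverse with _ | ⟨r, t⟩
    · exact absurd (by simpa using congrArg List.reverse hr) hne
    · exact ⟨r, t, rfl⟩
  have hr0 : 0 ≤ r := hnn r (List.mem_reverse.mp (by rw [hrt]; exact List.mem_cons_self))
  rw [PySem.List.maxD, hrt, PySem.List.max?_id_cons, Option.getD_some]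
  have h1 : (r :: t).foldl max 0 = t.foldl max r := by
    simp only [List.foldl_cons, max_eq_right hr0]
  rw [← h1, ← hrt, foldl_max_reverse]

-- ===== VERDICT (by name: the statement is the Claim_ definition above) =====
theorem cach1_spec : Claim_equal_cach1 := by
  intro n _
  unfold Spec_cach1
  rw [cach1, go_eq_fold, fold_closed]
  simp only [cach1_alt, zero_add, one_mul]
  by_cases h : 0 < n
  · rw [if_pos h, digits_eq_rev n h, List.map_reverse, ← dI_eq_dN n]
    have hne : dI n ≠ [] := by rw [dI, if_pos h]; simp
    rw [List.sum_reverse, foldl_mul_reverse, maxD_rev_eq (dI n) hne (dI_nonneg n),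
        List.map_reverse, List.sum_reverse, List.length_reverse]
  · rw [if_neg h, dI, if_neg h]
    simp [PySem.List.maxD, PySem.List.max?]
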